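-- pv_equiv track=rewrite | github.com/lrnzcig/sisifoDL | trash/pyspark/pyspark_utils/utils_feature_engineering.py | discretize_value
-- ===== SOURCE A (Python) =====
-- def discretize_value(value,
--                      break_values,
--                      prefix = 'age_range_'):
--   """
--   determina el rango de valores de 'break_points' en el que está 'value'
--   :param value: __int__ valor a clasificar
--   :param break_values: __list__ valores que emplear para la clasificación
--   """
--
--   # valores auxiliares
--   n_ranges = len(break_values)
--   min_value = break_values[0]
--   max_value = break_values[-1]
--
--   # casos nulos
--   if value is None:
--     return 'missing'
--
--   # casos extremos
--   if value < min_value: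
--     # inferior al mínimo de edad declarado
--     return prefix + 'under_' + str(min_value)
--   if value >= max_value:
--     # superior al máximo de edad declarado
--     return prefix + 'above_' + str(max_value)
--
--   # casos intermedios
--   i = 0
--   while value >= break_values[i]:
--     i += 1
--   return prefix + str(break_values[i-1]) + '_' + str(break_values[i])
-- ===== SOURCE B (Python) =====
-- def discretize_value(value,
--                      break_values,
--                      prefix = 'age_range_'):
--   # Binary search over the sorted break values instead of A's linear scan.
--   if value is None:
--     return 'missing'
--   first = break_values[0]
--   if value < first:
--     return prefix + 'under_' + str(first)
--   last = break_values[-1]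
--   if value >= last:
--     return prefix + 'above_' + str(last)
--   lo, hi = 0, len(break_values) - 1
--   while hi - lo > 1:
--     mid = (lo + hi) // 2
--     if value >= break_values[mid]:
--       lo = mid
--     else:
--       hi = mid
--   return prefix + str(break_values[lo]) + '_' + str(break_values[hi])
-- ===== Notes on version B (the rewrite author's own statement) =====
-- stated objective: alternative
-- what changed: Replaces A's front-to-back linear scan over break_values with a hand-written binary search (bisect_right-style lo/hi loop) over the sorted break values, and checks the None case before touching the list; intended as faster but a timing run measured only ~1.3x at the largest size.
-- outside the precondition, e.g. on discretize_value(3, [0, 9, 1, 8, 4], 'age_range_'): A returns 'age_range_0_9', B returns 'age_range_1_8'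
-- crash fix: On value=None with break_values=[] A raises IndexError (it indexes break_values[0] before the None check) while B returns 'missing'. — e.g. on discretize_value(none, [], "age_range_"): A raises IndexError, B returns "missing"
import Mathlib
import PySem

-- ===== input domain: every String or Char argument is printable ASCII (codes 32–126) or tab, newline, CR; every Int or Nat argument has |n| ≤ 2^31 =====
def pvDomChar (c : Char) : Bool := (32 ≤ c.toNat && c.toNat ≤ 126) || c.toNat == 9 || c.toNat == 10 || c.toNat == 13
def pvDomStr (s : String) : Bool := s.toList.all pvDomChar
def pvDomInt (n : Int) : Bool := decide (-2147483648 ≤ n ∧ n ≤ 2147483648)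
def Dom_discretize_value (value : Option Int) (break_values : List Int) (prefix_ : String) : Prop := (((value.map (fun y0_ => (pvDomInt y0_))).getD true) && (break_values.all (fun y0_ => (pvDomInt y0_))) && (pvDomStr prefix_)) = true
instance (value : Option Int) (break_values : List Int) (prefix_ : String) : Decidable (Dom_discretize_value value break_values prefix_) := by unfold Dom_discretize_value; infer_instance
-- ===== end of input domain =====

-- B replaces A's linear scan with a binary search over the sorted break values (fewer comparisons; measured ~1.3x, not confirmed >=1.5x faster).

-- ===== PORT A =====
-- the while loop 'i = 0; while value >= break_values[i]: i += 1': scan from the front,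
-- counting from accumulator i (indexing is in range on every iteration under Pre_)
def aFind (v : Int) : List Int → Nat → Nat
  | [], i => i
  | b :: rest, i => if b ≤ v then aFind v rest (i + 1) else i

def discretize_value (value : Option Int) (break_values : List Int) (prefix_ : String) : String :=
  -- min_value = break_values[0] and max_value = break_values[-1] are read BEFORE the None check
  match PySem.List.pyGet? break_values 0, PySem.List.pyGet? break_values (-1) with
  | some min_value, some max_value =>
    match value with
    | none => "missing"
    | some v =>
      if v < min_value then prefix_ ++ "under_" ++ PySem.Int.toStr min_value
      else if max_value ≤ v then prefix_ ++ "above_" ++ PySem.Int.toStr max_value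
      else
        let i := aFind v break_values 0
        prefix_ ++ PySem.Int.toStr (break_values.getD (i - 1) 0) ++ "_" ++ PySem.Int.toStr (break_values.getD i 0)
  | _, _ => "" -- IndexError on empty break_values: excluded by Pre_

-- ===== PORT B =====
-- the 'while hi - lo > 1' bisection loop of Source B; fuel = break_values.length bounds the
-- iteration count (the interval halves each step); indices are in range under Pre_
def bLoop (v : Int) (bv : List Int) : Nat → Nat → Nat → Nat × Nat
  | 0, lo, hi => (lo, hi)
  | fuel + 1, lo, hi =>
    if hi - lo > 1 then
      if bv.getD ((lo + hi) / 2) 0 ≤ v then bLoop v bv fuel ((lo + hi) / 2) hi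
      else bLoop v bv fuel lo ((lo + hi) / 2)
    else (lo, hi)

def discretize_value_alt (value : Option Int) (break_values : List Int) (prefix_ : String) : String :=
  match value with
  | none => "missing"
  | some v =>
    match PySem.List.pyGet? break_values 0 with
    | none => "" -- IndexError on empty break_values: excluded by Pre_
    | some first =>
      if v < first then prefix_ ++ "under_" ++ PySem.Int.toStr first
      else
        match PySem.List.pyGet? break_values (-1) with
        | none => "" -- unreachable: break_values is nonempty here
        | some last =>
          if last ≤ v then prefix_ ++ "above_" ++ PySem.Int.toStr last
          else
            let p := bLoop v break_values break_values.length 0 (break_values.length - 1)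
            prefix_ ++ PySem.Int.toStr (break_values.getD p.1 0) ++ "_" ++ PySem.Int.toStr (break_values.getD p.2 0)

-- ===== PRECONDITION & SPEC =====
-- value is None, below the first break value or at/above the last one: the interior scan never runs
def preOuter (value : Option Int) (break_values : List Int) : Bool :=
  match value with
  | none => true
  | some v => decide (v < break_values.getD 0 0) || decide (break_values.getD (break_values.length - 1) 0 ≤ v)

-- Pre_ excludes empty break_values (A raises IndexError there even for value=None) and unsorted
-- break_values whose value falls strictly inside the break range, where A's linear scan returns
-- an accidental bucket depending on element order (break points are by purpose a sorted list).
def Pre_discretize_value (value : Option Int) (break_values : List Int) (prefix_ : String) : Prop :=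
  break_values ≠ [] ∧ (break_values.Pairwise (· ≤ ·) ∨ preOuter value break_values = true)
instance (value : Option Int) (break_values : List Int) (prefix_ : String) : Decidable (Pre_discretize_value value break_values prefix_) := by unfold Pre_discretize_value; infer_instance

def pvWitness_discretize_value : Option Int × List Int × String := (some 5, [0, 10, 20], "age_range_")

-- On value=None with break_values=[] A raises IndexError (it reads break_values[0] before the
-- None check) while B returns 'missing'.
def Raises_discretize_value (value : Option Int) (break_values : List Int) (prefix_ : String) : Prop :=
  value = none ∧ break_values = []
instance (value : Option Int) (break_values : List Int) (prefix_ : String) : Decidable (Raises_discretize_value value break_values prefix_) := by unfold Raises_discretize_value; infer_instance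
def pvRaiseWitness_discretize_value : Option Int × List Int × String := (none, [], "age_range_")
def pvRaiseWitnessOut_discretize_value : String := "missing"

def Spec_discretize_value (value : Option Int) (break_values : List Int) (prefix_ : String) (out : String) : Prop := out = discretize_value_alt value break_values prefix_
instance (value : Option Int) (break_values : List Int) (prefix_ : String) (out : String) : Decidable (Spec_discretize_value value break_values prefix_ out) := by unfold Spec_discretize_value; infer_instance

-- ===== CLAIM (what is proved, stated in full; the proofs are below) =====
def Claim_equal_discretize_value : Prop := ∀ (value : Option Int) (break_values : List Int) (prefix_ : String), Dom_discretize_value value break_values prefix_ → Pre_discretize_value value break_values prefix_ → Spec_discretize_value value break_values prefix_ (discretize_value value break_values prefix_)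
def Claim_raises_discretize_value : Prop := (∀ (value : Option Int) (break_values : List Int) (prefix_ : String), Dom_discretize_value value break_values prefix_ → Raises_discretize_value value break_values prefix_ → ¬ Pre_discretize_value value break_values prefix_) ∧ (Dom_discretize_value (pvRaiseWitness_discretize_value.1) (pvRaiseWitness_discretize_value.2.1) (pvRaiseWitness_discretize_value.2.2) ∧ Raises_discretize_value (pvRaiseWitness_discretize_value.1) (pvRaiseWitness_discretize_value.2.1) (pvRaiseWitness_discretize_value.2.2) ∧ discretize_value_alt (pvRaiseWitness_discretize_value.1) (pvRaiseWitness_discretize_value.2.1) (pvRaiseWitness_discretize_value.2.2) = pvRaiseWitnessOut_discretize_value)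

-- ===== LEMMAS AND PROOFS =====

-- number of leading break values ≤ v: what A's while loop counts
def cnt (v : Int) (l : List Int) : Nat := (l.takeWhile (fun b => decide (b ≤ v))).length

lemma aFind_eq (v : Int) : ∀ (l : List Int) (i : Nat), aFind v l i = i + cnt v l := by
  intro l
  induction l with
  | nil => intro i; simp [aFind, cnt]
  | cons b rest ih =>
    intro i
    by_cases h : b ≤ v
    · simp [aFind, cnt, h, ih]; omega
    · simp [aFind, cnt, h]

lemma cnt_le (v : Int) (l : List Int) : cnt v l ≤ l.length :=
  (List.takeWhile_sublist _).length_le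

lemma cnt_before (v : Int) : ∀ (l : List Int) (j : Nat), j < cnt v l → l.getD j 0 ≤ v := by
  intro l
  induction l with
  | nil => intro j hj; simp [cnt] at hj
  | cons b rest ih =>
    intro j hj
    by_cases h : b ≤ v
    · cases j with
      | zero => simpa using h
      | succ j' =>
        simp only [cnt, List.takeWhile_cons, h, decide_true, if_true, List.length_cons] at hj
        simpa using ih j' (by simpa [cnt] using Nat.lt_of_succ_lt_succ hj)
    · simp [cnt, h] at hj

lemma cnt_at (v : Int) : ∀ (l : List Int), cnt v l < l.length → v < l.getD (cnt v l) 0 := by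
  intro l
  induction l with
  | nil => intro h; simp [cnt] at h
  | cons b rest ih =>
    intro h
    by_cases hb : b ≤ v
    · have hc : cnt v (b :: rest) = cnt v rest + 1 := by
        simp [cnt, hb]
      rw [hc]
      simp only [List.getD_cons_succ]
      exact ih (by rw [hc] at h; simpa using Nat.lt_of_succ_lt_succ h)
    · have hc : cnt v (b :: rest) = 0 := by simp [cnt, hb]
      rw [hc]
      simpa using lt_of_not_ge hb

lemma sorted_getD_mono (l : List Int) (h : l.Pairwise (· ≤ ·)) (i j : Nat)
    (hij : i ≤ j) (hj : j < l.length) : l.getD i 0 ≤ l.getD j 0 := by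
  rcases Nat.lt_or_ge i j with hlt | hge
  · have hi : i < l.length := lt_trans hlt hj
    rw [List.getD_eq_getElem l 0 hi, List.getD_eq_getElem l 0 hj]
    exact List.pairwise_iff_getElem.mp h i j hi hj hlt
  · have : i = j := le_antisymm hij hge
    subst this; exact le_refl _

lemma bLoop_eq (v : Int) (bv : List Int) (k : Nat)
    (hk1 : ∀ j, j < k → bv.getD j 0 ≤ v)
    (hk2 : ∀ j, k ≤ j → j < bv.length → v < bv.getD j 0) :
    ∀ (fuel lo hi : Nat), lo < k → k ≤ hi → hi < bv.length → hi - lo ≤ fuel →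
      bLoop v bv fuel lo hi = (k - 1, k) := by
  intro fuel
  induction fuel with
  | zero => intro lo hi h1 h2 h3 h4; omega
  | succ f ih =>
    intro lo hi h1 h2 h3 h4
    simp only [bLoop]
    by_cases hgt : hi - lo > 1
    · rw [if_pos hgt]
      have hmid1 : lo + 1 ≤ (lo + hi) / 2 := by omega
      have hmid2 : (lo + hi) / 2 + 1 ≤ hi := by omega
      by_cases hm : bv.getD ((lo + hi) / 2) 0 ≤ v
      · rw [if_pos hm]
        have hmk : (lo + hi) / 2 < k := by
          by_contra hc
          exact absurd (hk2 ((lo + hi) / 2) (by omega) (by omega)) (not_lt_of_ge hm)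
        exact ih _ _ hmk h2 h3 (by omega)
      · rw [if_neg hm]
        have hkm : k ≤ (lo + hi) / 2 := by
          by_contra hc
          exact hm (hk1 _ (by omega))
        exact ih _ _ h1 hkm (by omega) (by omega)
    · rw [if_neg hgt]
      have h5 : hi = k := by omega
      have h6 : lo = k - 1 := by omega
      rw [h5, h6]

-- ===== VERDICT (by name: the statement is the Claim_ definition above) =====
theorem discretize_value_spec : Claim_equal_discretize_value := by
  intro value bv p _ hPre
  obtain ⟨hne, hOr⟩ := hPre
  unfold Spec_discretize_value
  cases bv with
  | nil => exact absurd rfl hne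
  | cons b rest =>
    have hz : PySem.List.pyGet? (b :: rest) 0 = some b := PySem.List.pyGet?_zero_cons b rest
    have hlast : PySem.List.pyGet? (b :: rest) (-1)
        = some ((b :: rest).getLast (List.cons_ne_nil b rest)) := by
      rw [PySem.List.pyGet?_neg_one, List.getLast?_eq_some_getLast]
    cases value with
    | none => simp only [discretize_value, discretize_value_alt, hz, hlast]
    | some v =>
      simp only [discretize_value, discretize_value_alt, hz, hlast]
      by_cases h1 : v < b
      · rw [if_pos h1, if_pos h1]
      · rw [if_neg h1, if_neg h1]
        by_cases h2 : (b :: rest).getLast (List.cons_ne_nil b rest) ≤ v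
        · rw [if_pos h2, if_pos h2]
        · rw [if_neg h2, if_neg h2]
          -- middle branch: here Pre_ forces the break values to be sorted
          have hsort : (b :: rest).Pairwise (· ≤ ·) := by
            rcases hOr with hs | ho
            · exact hs
            · exfalso
              simp only [preOuter, Bool.or_eq_true, decide_eq_true_eq] at ho
              rcases ho with hlo | hhi
              · exact h1 (by simpa using hlo)
              · refine h2 ?_
                have hg : (b :: rest).getLast (List.cons_ne_nil b rest)
                    = (b :: rest).getD ((b :: rest).length - 1) 0 := by
                  rw [List.getD_eq_getElem _ 0 (by simp), List.getLast_eq_getElem]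
                  rfl
                rw [hg]; exact hhi
          set l := b :: rest with hl
          set k := cnt v l with hk
          set n := l.length with hn
          have hbn : 0 < n := by simp [hn, hl]
          have hvlast : v < l.getD (n - 1) 0 := by
            have : l.getLast (by simp [hl]) = l[n - 1]'(by omega) :=
              List.getLast_eq_getElem _
            rw [List.getD_eq_getElem l 0 (by omega), ← this]
            exact lt_of_not_ge h2
          have hk_pos : 1 ≤ k := by
            have hb : b ≤ v := le_of_not_gt h1
            simp [hk, hl, cnt, hb]
          have hk_lt : k < n := by
            by_contra hc
            have hkn : k = n := le_antisymm (cnt_le v l) (by omega)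
            exact absurd (cnt_before v l (n - 1) (by omega)) (not_le_of_gt hvlast)
          have hk2 : ∀ j, k ≤ j → j < l.length → v < l.getD j 0 := by
            intro j hkj hjn
            calc v < l.getD k 0 := cnt_at v l (by omega)
              _ ≤ l.getD j 0 := sorted_getD_mono l hsort k j hkj hjn
          have hb_eq : bLoop v l n 0 (n - 1) = (k - 1, k) :=
            bLoop_eq v l k (fun j hj => cnt_before v l j hj) hk2 n 0 (n - 1)
              (by omega) (by omega) (by omega) (by omega)
          have ha_eq : aFind v l 0 = k := by rw [aFind_eq]; omega
          simp only [ha_eq, hb_eq]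

theorem discretize_value_raises : Claim_raises_discretize_value := by
  unfold Claim_raises_discretize_value
  exact ⟨fun value bv p _ hR hP => hP.1 hR.2, by decide⟩

-- self-check: the raise-witness value recorded above is indeed what port B returns there
theorem discretize_value_raises_ok :
    discretize_value_alt pvRaiseWitness_discretize_value.1 pvRaiseWitness_discretize_value.2.1
      pvRaiseWitness_discretize_value.2.2 = pvRaiseWitnessOut_discretize_value :=
  discretize_value_raises.2.2.2
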